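-- pv_equiv track=rewrite | github.com/ShakalBhau0001/classical-crypto-gui-toolkit | core/ciphers/row_column.py | _get_column_order
-- ===== SOURCE A (Python) =====
-- def _get_column_order(key: str):
--     sorted_key = sorted(list(key))
--     order = []
--
--     for char in key:
--         idx = sorted_key.index(char)
--         order.append(idx)
--         sorted_key[idx] = None
--
--     return order
-- ===== SOURCE B (Python) =====
-- def _get_column_order(key: str):
--     # Counting approach: each char's rank = (#chars smaller) + (#equal chars already seen).
--     counts = {}
--     for c in key:
--         counts[c] = counts.get(c, 0) + 1
--     base = {}
--     total = 0
--     for c in sorted(counts):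
--         base[c] = total
--         total += counts[c]
--     order = []
--     for c in key:
--         order.append(base[c])
--         base[c] += 1
--     return order
-- ===== Notes on version B (the rewrite author's own statement) =====
-- stated objective: faster
-- what changed: Replaced the per-character linear scan of a mutated sorted copy (list.index + None-marking) by a counting scheme: one counter pass, one prefix-sum over the sorted distinct characters giving each character its base rank, then one pass emitting and bumping the base.
import Mathlib
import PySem

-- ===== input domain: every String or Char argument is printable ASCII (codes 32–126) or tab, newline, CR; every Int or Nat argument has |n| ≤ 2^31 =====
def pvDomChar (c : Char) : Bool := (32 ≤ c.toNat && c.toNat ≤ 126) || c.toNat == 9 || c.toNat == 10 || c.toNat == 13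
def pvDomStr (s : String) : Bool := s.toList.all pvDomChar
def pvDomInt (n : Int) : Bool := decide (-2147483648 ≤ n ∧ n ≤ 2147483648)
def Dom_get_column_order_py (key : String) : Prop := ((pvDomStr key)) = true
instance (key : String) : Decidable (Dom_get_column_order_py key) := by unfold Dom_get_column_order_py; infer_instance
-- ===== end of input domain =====

-- B replaces A's quadratic scan-and-mark of a sorted copy by counting (counter, prefix sums
-- over sorted distinct chars, one emitting pass); equivalence of the return values is proved below.

-- ===== PORT A =====
-- sorted(list(key)); then for each char: idx = sorted_key.index(char); append; sorted_key[idx] = None.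
-- sorted_key holds Option Char (None marking); .index never fails on reachable states, the
-- 'none' branch of index? is dead code kept only to make the fold total.
def get_column_order_py (key : String) : List Int :=
  let sortedKey : List (Option Char) := (PySem.List.sorted key.toList (fun x => x) false).map some
  (key.toList.foldl
    (fun (st : List (Option Char) × List Int) ch =>
      match PySem.List.index? st.1 (some ch) with
      | some idx => (st.1.set idx none, st.2 ++ [(idx : Int)])
      | none => st)
    (sortedKey, [])).2

-- ===== PORT B =====
-- counts = counter over key; base[c] = prefix sums of counts over sorted distinct chars;
-- then one pass appending base[c] and incrementing it. base[c] is always present when read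
-- (every char of key is a key of counts, hence of base), so getD's default is dead.
def get_column_order_py_alt (key : String) : List Int :=
  let counts : PySem.Dict Char Int :=
    key.toList.foldl (fun d c => d.insert c (d.getD c 0 + 1)) PySem.Dict.empty
  let bt : PySem.Dict Char Int × Int :=
    (PySem.List.sorted counts.keys (fun x => x) false).foldl
      (fun (st : PySem.Dict Char Int × Int) c => (st.1.insert c st.2, st.2 + counts.getD c 0))
      (PySem.Dict.empty, 0)
  (key.toList.foldl
    (fun (st : PySem.Dict Char Int × List Int) c =>
      (st.1.insert c (st.1.getD c 0 + 1), st.2 ++ [st.1.getD c 0]))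
    (bt.1, [])).2

-- ===== PRECONDITION & SPEC =====
def Spec_get_column_order_py (key : String) (out : List Int) : Prop := out = get_column_order_py_alt key
instance (key : String) (out : List Int) : Decidable (Spec_get_column_order_py key out) := by unfold Spec_get_column_order_py; infer_instance

-- ===== CLAIM (what is proved, stated in full; the proofs are below) =====
def Claim_equal_get_column_order_py : Prop := ∀ (key : String), Dom_get_column_order_py key → Spec_get_column_order_py key (get_column_order_py key)

-- ===== LEMMAS AND PROOFS =====


-- proof-only helpers ----------------------------------------------------------

-- count of characters of L strictly below c (the "base rank" of c)
def ltc (L : List Char) (c : Char) : Nat := (L.filter (fun d => decide (d < c))).length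

def bump (m : Char → Nat) (c : Char) : Char → Nat := fun x => if x = c then m x + 1 else m x

def decAt (m : Char → Nat) (a : Char) : Char → Nat := fun x => if x = a then m x - 1 else m x

-- A's mutated sorted copy after marking, for each char d, its first (m d) occurrences
def mark : List Char → (Char → Nat) → List (Option Char)
  | [], _ => []
  | a :: t, m => if m a = 0 then some a :: mark t m else none :: mark t (decAt m a)

-- position of the k-th occurrence of c in a list
def nthOcc : List Char → Char → Nat → Nat
  | [], _, _ => 0
  | a :: t, c, k => if a = c then (if k = 0 then 0 else nthOcc t c (k - 1) + 1) else nthOcc t c k + 1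

-- common specification of both loops: rank of each remaining char, m = counts already emitted
def outSpec (L : List Char) : List Char → (Char → Nat) → List Int
  | [], _ => []
  | c :: t, m => (((ltc L c : Nat) : Int) + ((m c : Nat) : Int)) :: outSpec L t (bump m c)

theorem mark_zero (S : List Char) : mark S (fun _ => 0) = S.map some := by
  induction S with
  | nil => rfl
  | cons a t ih => simp [mark, ih]

theorem mark_index (S : List Char) (m : Char → Nat) (c : Char) (h : m c < S.count c) :
    PySem.List.index? (mark S m) (some c) = some (nthOcc S c (m c)) := by
  induction S generalizing m with
  | nil => simp at h
  | cons a t ih =>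
    by_cases hma : m a = 0
    · by_cases hac : a = c
      · subst hac
        rw [mark, if_pos hma, hma, nthOcc]
        simp [List.idxOf?_cons]
      · have h' : m c < t.count c := by
          rwa [List.count_cons_of_ne (by simpa using hac)] at h
        rw [mark, if_pos hma]
        rw [PySem.List.index?_cons_of_ne _ (by simp [hac]), ih _ h']
        simp [nthOcc, hac]
    · rw [mark, if_neg hma]
      rw [PySem.List.index?_cons_of_ne _ (by simp)]
      by_cases hac : a = c
      · subst hac
        have hda : decAt m a a = m a - 1 := by simp [decAt]
        have h' : decAt m a a < t.count a := by
          rw [List.count_cons_self] at h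
          omega
        rw [ih _ h', hda]
        rw [nthOcc, if_pos rfl, if_neg hma]
        simp
      · have hdc : decAt m a c = m c := by simp [decAt, Ne.symm hac]
        have h' : decAt m a c < t.count c := by
          rw [hdc]
          rwa [List.count_cons_of_ne (by simpa using hac)] at h
        rw [ih _ h', hdc]
        rw [nthOcc, if_neg hac]
        simp

theorem bump_ne_zero_self (m : Char → Nat) (c : Char) : ¬ bump m c c = 0 := by
  simp [bump]

theorem bump_self (m : Char → Nat) (c : Char) : bump m c c = m c + 1 := by
  simp [bump]

theorem mark_set (S : List Char) (m : Char → Nat) (c : Char) (h : m c < S.count c) :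
    (mark S m).set (nthOcc S c (m c)) none = mark S (bump m c) := by
  induction S generalizing m with
  | nil => simp at h
  | cons a t ih =>
    by_cases hma : m a = 0
    · by_cases hac : a = c
      · subst hac
        have hb : decAt (bump m a) a = m := by
          funext x; by_cases hx : x = a <;> simp [decAt, bump, hx]
        have hn : nthOcc (a :: t) a (m a) = 0 := by simp [nthOcc, hma]
        rw [mark, if_pos hma, hn, List.set_cons_zero,
            mark, if_neg (bump_ne_zero_self m a), hb]
      · have h' : m c < t.count c := by
          rwa [List.count_cons_of_ne (by simpa using hac)] at h
        rw [mark, if_pos hma, nthOcc, if_neg hac, List.set_cons_succ, ih _ h']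
        rw [mark, if_pos (show bump m c a = 0 by simp [bump, hac, hma])]
    · rw [mark, if_neg hma]
      by_cases hac : a = c
      · subst hac
        have hda : decAt m a a = m a - 1 := by simp [decAt]
        have h' : decAt m a a < t.count a := by
          rw [List.count_cons_self] at h; omega
        have hb : bump (decAt m a) a = decAt (bump m a) a := by
          funext x; by_cases hx : x = a <;> simp [decAt, bump, hx]
          omega
        rw [nthOcc, if_pos rfl, if_neg hma, List.set_cons_succ]
        rw [← hda, ih _ h', hb]
        rw [mark, if_neg (bump_ne_zero_self m a)]
      · have hca : ¬ c = a := fun hh => hac hh.symm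
        have hdc : decAt m a c = m c := by simp [decAt, hca]
        have h' : decAt m a c < t.count c := by
          rw [hdc]; rwa [List.count_cons_of_ne (by simpa using hac)] at h
        have hb : bump (decAt m a) c = decAt (bump m c) a := by
          funext x
          by_cases hx : x = a
          · subst hx; simp [decAt, bump, hac]
          · by_cases hx2 : x = c
            · subst hx2; simp [decAt, bump, hx]
            · simp [decAt, bump, hx, hx2]
        rw [nthOcc, if_neg hac, List.set_cons_succ, ← hdc, ih _ h', hb]
        rw [mark, if_neg (show ¬ bump m c a = 0 by simpa [bump, hac] using hma)]

theorem nth_sorted (S : List Char) (c : Char) (k : Nat)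
    (hs : S.Pairwise (fun a b => a ≤ b)) (h : k < S.count c) :
    nthOcc S c k = ltc S c + k := by
  induction S generalizing k with
  | nil => simp at h
  | cons a t ih =>
    rw [List.pairwise_cons] at hs
    obtain ⟨ha, ht⟩ := hs
    by_cases hac : a = c
    · subst hac
      have hfe : t.filter (fun d => decide (d < a)) = [] :=
        List.filter_eq_nil_iff.mpr (fun b hb => by simpa using not_lt.mpr (ha b hb))
      have hz : ltc (a :: t) a = 0 := by simp [ltc, hfe]
      by_cases hk : k = 0
      · subst hk; simp [nthOcc, hz]
      · have hk1 : k - 1 < t.count a := by rw [List.count_cons_self] at h; omega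
        have hzt : ltc t a = 0 := by simp [ltc, hfe]
        rw [nthOcc, if_pos rfl, if_neg hk, ih _ ht hk1, hzt, hz]
        omega
    · have hct : k < t.count c := by
        rwa [List.count_cons_of_ne (by simpa using hac)] at h
      have hmem : c ∈ t := List.count_pos_iff.mp (Nat.lt_of_le_of_lt (Nat.zero_le k) hct)
      have halt : a < c := lt_of_le_of_ne (ha c hmem) hac
      have hone : ltc (a :: t) c = ltc t c + 1 := by
        simp [ltc, halt]
      rw [nthOcc, if_neg hac, ih _ ht hct, hone]
      omega

theorem loopA (L S : List Char) (r : List Char) (m : Char → Nat) (acc : List Int)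
    (hs : S.Pairwise (fun a b => a ≤ b))
    (hl : ∀ c, ltc S c = ltc L c)
    (hcnt : ∀ d, m d + r.count d ≤ S.count d) :
    (r.foldl
      (fun (st : List (Option Char) × List Int) ch =>
        match PySem.List.index? st.1 (some ch) with
        | some idx => (st.1.set idx none, st.2 ++ [(idx : Int)])
        | none => st)
      (mark S m, acc)).2 = acc ++ outSpec L r m := by
  induction r generalizing m acc with
  | nil => simp [outSpec]
  | cons c t ih =>
    have hc : m c < S.count c := by
      have := hcnt c
      rw [List.count_cons_self] at this
      omega
    have hcnt' : ∀ d, bump m c d + t.count d ≤ S.count d := by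
      intro d
      by_cases hdc : d = c
      · subst hdc
        have := hcnt d
        rw [List.count_cons_self] at this
        rw [bump_self]
        omega
      · have := hcnt d
        rw [List.count_cons_of_ne (by simpa using fun hh => hdc hh.symm)] at this
        simpa [bump, hdc] using this
    rw [List.foldl_cons, mark_index S m c hc]
    simp only []
    rw [mark_set S m c hc, ih _ _ hcnt']
    rw [nth_sorted S c (m c) hs hc, hl c, outSpec]
    push_cast
    simp [List.append_assoc]

theorem loopB (L : List Char) (r : List Char) (m : Char → Nat) (bd : PySem.Dict Char Int)
    (acc : List Int)
    (hbd : ∀ c ∈ r, bd.getD c 0 = ((ltc L c : Nat) : Int) + ((m c : Nat) : Int)) :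
    (r.foldl
      (fun (st : PySem.Dict Char Int × List Int) c =>
        (st.1.insert c (st.1.getD c 0 + 1), st.2 ++ [st.1.getD c 0]))
      (bd, acc)).2 = acc ++ outSpec L r m := by
  induction r generalizing m bd acc with
  | nil => simp [outSpec]
  | cons c t ih =>
    have hc := hbd c (List.mem_cons_self ..)
    rw [List.foldl_cons]
    rw [ih (bump m c) _ _ ?_]
    · rw [hc, outSpec]
      simp [List.append_assoc]
    · intro c' hc'
      rw [PySem.Dict.getD_insert]
      by_cases hcc : c' = c
      · subst hcc
        rw [if_pos rfl, hc]
        simp [bump]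
        omega
      · rw [if_neg hcc, hbd c' (List.mem_cons_of_mem _ hc')]
        simp [bump, hcc]

theorem baseFold_untouched (f : Char → Int) (D : List Char) (bd : PySem.Dict Char Int)
    (t : Int) (a : Char) (ha : a ∉ D) :
    ((D.foldl (fun (st : PySem.Dict Char Int × Int) c => (st.1.insert c st.2, st.2 + f c))
      (bd, t)).1).getD a 0 = bd.getD a 0 := by
  induction D generalizing bd t with
  | nil => rfl
  | cons d D' ih =>
    rw [List.mem_cons, not_or] at ha
    rw [List.foldl_cons, ih _ _ ha.2]
    exact PySem.Dict.getD_insert_of_ne _ _ _ ha.1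

theorem baseFold_getD (f : Char → Int) (D : List Char) (hD : D.Pairwise (fun a b => a < b))
    (bd : PySem.Dict Char Int) (t : Int) (c : Char) (hc : c ∈ D) :
    ((D.foldl (fun (st : PySem.Dict Char Int × Int) c => (st.1.insert c st.2, st.2 + f c))
      (bd, t)).1).getD c 0
      = t + ((D.filter (fun d => decide (d < c))).map f).sum := by
  induction D generalizing bd t with
  | nil => simp at hc
  | cons a D' ih =>
    rw [List.pairwise_cons] at hD
    obtain ⟨ha, hD'⟩ := hD
    rw [List.foldl_cons]
    by_cases hca : c = a
    · subst hca
      have hnotin : c ∉ D' := fun hmem => lt_irrefl c (ha c hmem)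
      rw [baseFold_untouched f D' _ _ c hnotin]
      rw [show ((bd, t).1.insert c (bd, t).2) = bd.insert c t from rfl,
          PySem.Dict.getD_insert_self]
      have hfe : D'.filter (fun d => decide (d < c)) = [] :=
        List.filter_eq_nil_iff.mpr (fun b hb => by simpa using not_lt.mpr (le_of_lt (ha b hb)))
      simp [hfe]
    · have hmem : c ∈ D' := by
        rcases List.mem_cons.mp hc with h1 | h1
        · exact absurd h1 hca
        · exact h1
      rw [ih hD' _ _ hmem]
      have hac : a < c := ha c hmem
      rw [List.filter_cons, if_pos (by simpa using hac)]
      simp only [List.map_cons, List.sum_cons]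
      ring

theorem sum_counts_filter (L : List Char) (c : Char) :
    (((PySem.List.sorted (PySem.Set.ofList L) (fun x => x) false).filter
        (fun d => decide (d < c))).map (fun d => (L.count d : Int))).sum
      = ((ltc L c : Nat) : Int) := by
  have hperm : (PySem.List.sorted (PySem.Set.ofList L) (fun x => x) false).Perm
      (PySem.Set.ofList L) := PySem.List.sorted_perm _ _ _
  have hperm2 : (PySem.Set.ofList L).Perm L.dedup := by
    rw [List.perm_ext_iff_of_nodup (PySem.Set.nodup_ofList L) L.nodup_dedup]
    intro x
    rw [PySem.Set.mem_ofList, List.mem_dedup]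
  have h3 := ((hperm.trans hperm2).filter (fun d => decide (d < c))).map
      (fun d => (L.count d : Int))
  rw [h3.sum_eq]
  have h4 : ((L.dedup.filter (fun d => decide (d < c))).map
        (fun x => L.count x)).sum = L.countP (fun d => decide (d < c)) :=
    List.sum_map_count_dedup_filter_eq_countP _ L
  have h5 : ltc L c = L.countP (fun d => decide (d < c)) := by
    rw [ltc, List.countP_eq_length_filter]
  rw [h5, ← h4]
  push_cast [List.map_map]
  rfl

-- ===== VERDICT (by name: the statement is the Claim_ definition above) =====
theorem get_column_order_py_spec : Claim_equal_get_column_order_py := by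
  intro key _
  unfold Spec_get_column_order_py
  have hA : get_column_order_py key = outSpec key.toList key.toList (fun _ => 0) := by
    have e1 : get_column_order_py key =
        (key.toList.foldl
          (fun (st : List (Option Char) × List Int) ch =>
            match PySem.List.index? st.1 (some ch) with
            | some idx => (st.1.set idx none, st.2 ++ [(idx : Int)])
            | none => st)
          ((PySem.List.sorted key.toList (fun x => x) false).map some, [])).2 := rfl
    have hpermS : (PySem.List.sorted key.toList (fun x => x) false).Perm key.toList :=
      PySem.List.sorted_perm _ _ _
    rw [e1, ← mark_zero]
    rw [loopA key.toList _ key.toList (fun _ => 0) []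
        (by simpa using PySem.List.sorted_pairwise (xs := key.toList) (key := fun x => x))
        (fun c => by unfold ltc; rw [(hpermS.filter _).length_eq])
        (fun d => by rw [hpermS.count_eq]; simp)]
    simp
  have hB : get_column_order_py_alt key = outSpec key.toList key.toList (fun _ => 0) := by
    have e2 : get_column_order_py_alt key =
        (key.toList.foldl
          (fun (st : PySem.Dict Char Int × List Int) c =>
            (st.1.insert c (st.1.getD c 0 + 1), st.2 ++ [st.1.getD c 0]))
          ((((PySem.List.sorted
                ((key.toList.foldl
                  (fun (d : PySem.Dict Char Int) c => d.insert c (d.getD c 0 + 1))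
                  PySem.Dict.empty).keys) (fun x => x) false).foldl
              (fun (st : PySem.Dict Char Int × Int) c =>
                (st.1.insert c st.2,
                 st.2 + (key.toList.foldl
                    (fun (d : PySem.Dict Char Int) c => d.insert c (d.getD c 0 + 1))
                    PySem.Dict.empty).getD c 0))
              (PySem.Dict.empty, 0)).1), [])).2 := rfl
    have hcounts : (key.toList.foldl
        (fun (d : PySem.Dict Char Int) c => d.insert c (d.getD c 0 + 1))
        PySem.Dict.empty) = PySem.Dict.counter key.toList :=
      PySem.Dict.foldl_insert_getD_add_one_eq_counter key.toList
    rw [e2, hcounts, PySem.Dict.keys_counter]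
    have hD : (PySem.List.sorted (PySem.Set.ofList key.toList) (fun x => x) false).Pairwise
        (fun a b => a < b) := PySem.List.sorted_ofList_pairwise_lt key.toList
    have hbd : ∀ c ∈ key.toList,
        (((PySem.List.sorted (PySem.Set.ofList key.toList) (fun x => x) false).foldl
            (fun (st : PySem.Dict Char Int × Int) c =>
              (st.1.insert c st.2, st.2 + (PySem.Dict.counter key.toList).getD c 0))
            (PySem.Dict.empty, 0)).1).getD c 0
          = ((ltc key.toList c : Nat) : Int) + (((fun _ => 0 : Char → Nat) c : Nat) : Int) := by
      intro c hc
      have hmem : c ∈ PySem.List.sorted (PySem.Set.ofList key.toList) (fun x => x) false := by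
        rw [PySem.List.mem_sorted, PySem.Set.mem_ofList]
        exact hc
      rw [baseFold_getD _ _ hD _ 0 c hmem]
      have hmap : ((PySem.List.sorted (PySem.Set.ofList key.toList) (fun x => x) false).filter
          (fun d => decide (d < c))).map (fun d => (PySem.Dict.counter key.toList).getD d 0)
        = ((PySem.List.sorted (PySem.Set.ofList key.toList) (fun x => x) false).filter
          (fun d => decide (d < c))).map (fun d => (key.toList.count d : Int)) :=
        List.map_congr_left (fun d _ => PySem.Dict.getD_counter key.toList d)
      rw [hmap, sum_counts_filter]
      simp
    rw [loopB key.toList key.toList (fun _ => 0) _ [] hbd]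
    simp
  rw [hA, hB]
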